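-- pv_equiv track=rewrite | github.com/Segneal/distribuidos | scripts/sql-driven-testing/validators.py | _determine_categories_covered
-- ===== SOURCE A (Python) =====
-- from typing import Dict, List, Any, Tuple
--
-- def _determine_categories_covered(examples: Dict[str, Any]) -> List[str]:
--     """Determine which categories are covered by examples"""
--     categories = []
--
--     example_names = list(examples.keys())
--
--     if any('Login' in name for name in example_names):
--         categories.append('authentication')
--
--     if any('Usuario' in name for name in example_names):
--         categories.append('users')
--
--     if any('Donacion' in name for name in example_names):
--         categories.append('inventory')
--
--     if any('Evento' in name for name in example_names):
--         categories.append('events')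
--
--     if any('Red' in name or 'Solicitud' in name or 'Oferta' in name for name in example_names):
--         categories.append('network')
--
--     return categories
-- ===== SOURCE B (Python) =====
-- def _determine_categories_covered(examples):
--     """Single pass over the keys maintaining five flags, then build the list."""
--     auth = users = inv = ev = net = False
--     for name in examples:
--         if 'Login' in name:
--             auth = True
--         if 'Usuario' in name:
--             users = True
--         if 'Donacion' in name:
--             inv = True
--         if 'Evento' in name:
--             ev = True
--         if 'Red' in name or 'Solicitud' in name or 'Oferta' in name:
--             net = True
--     categories = []
--     if auth:
--         categories.append('authentication')
--     if users:
--         categories.append('users')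
--     if inv:
--         categories.append('inventory')
--     if ev:
--         categories.append('events')
--     if net:
--         categories.append('network')
--     return categories
-- ===== Notes on version B (the rewrite author's own statement) =====
-- stated objective: alternative
-- what changed: Replaces five separate any()-scans over the key list with one traversal that maintains five boolean flags and builds the result list from the flags afterwards.
import Mathlib
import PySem

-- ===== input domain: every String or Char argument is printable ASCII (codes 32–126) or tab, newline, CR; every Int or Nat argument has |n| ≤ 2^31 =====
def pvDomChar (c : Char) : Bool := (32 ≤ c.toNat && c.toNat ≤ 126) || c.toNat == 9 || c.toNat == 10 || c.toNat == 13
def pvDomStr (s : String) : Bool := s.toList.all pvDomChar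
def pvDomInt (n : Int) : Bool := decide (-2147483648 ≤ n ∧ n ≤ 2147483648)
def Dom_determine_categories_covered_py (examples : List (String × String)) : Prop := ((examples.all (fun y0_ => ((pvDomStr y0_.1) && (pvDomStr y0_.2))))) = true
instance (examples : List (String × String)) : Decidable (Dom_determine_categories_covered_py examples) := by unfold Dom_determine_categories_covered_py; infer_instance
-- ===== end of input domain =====

-- B replaces A's five separate any-scans over the keys with one fold maintaining five flags (objective: alternative single-pass decomposition).


-- ===== PORT A =====
def determine_categories_covered_py (examples : List (String × String)) : List String :=
  let categories : List String := []
  let example_names := examples.map (fun kv => kv.1)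
  let categories := if example_names.any (fun name => PySem.Str.isIn "Login" name) then categories ++ ["authentication"] else categories
  let categories := if example_names.any (fun name => PySem.Str.isIn "Usuario" name) then categories ++ ["users"] else categories
  let categories := if example_names.any (fun name => PySem.Str.isIn "Donacion" name) then categories ++ ["inventory"] else categories
  let categories := if example_names.any (fun name => PySem.Str.isIn "Evento" name) then categories ++ ["events"] else categories
  let categories := if example_names.any (fun name => PySem.Str.isIn "Red" name || PySem.Str.isIn "Solicitud" name || PySem.Str.isIn "Oferta" name) then categories ++ ["network"] else categories
  categories

-- ===== PORT B =====
-- one pass over the keys, updating five flags (each 'if c: flag = True' is 'if c then true else flag')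
def pvFlagsStep (fl : Bool × Bool × Bool × Bool × Bool) (kv : String × String) : Bool × Bool × Bool × Bool × Bool :=
  let name := kv.1
  ((if PySem.Str.isIn "Login" name then true else fl.1),
   (if PySem.Str.isIn "Usuario" name then true else fl.2.1),
   (if PySem.Str.isIn "Donacion" name then true else fl.2.2.1),
   (if PySem.Str.isIn "Evento" name then true else fl.2.2.2.1),
   (if PySem.Str.isIn "Red" name || PySem.Str.isIn "Solicitud" name || PySem.Str.isIn "Oferta" name then true else fl.2.2.2.2))

def determine_categories_covered_py_alt (examples : List (String × String)) : List String :=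
  let fl := examples.foldl pvFlagsStep (false, false, false, false, false)
  let categories : List String := []
  let categories := if fl.1 then categories ++ ["authentication"] else categories
  let categories := if fl.2.1 then categories ++ ["users"] else categories
  let categories := if fl.2.2.1 then categories ++ ["inventory"] else categories
  let categories := if fl.2.2.2.1 then categories ++ ["events"] else categories
  let categories := if fl.2.2.2.2 then categories ++ ["network"] else categories
  categories

-- ===== PRECONDITION & SPEC =====
def Spec_determine_categories_covered_py (examples : List (String × String)) (out : List String) : Prop := out = determine_categories_covered_py_alt examples
instance (examples : List (String × String)) (out : List String) : Decidable (Spec_determine_categories_covered_py examples out) := by unfold Spec_determine_categories_covered_py; infer_instance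

-- ===== CLAIM (what is proved, stated in full; the proofs are below) =====
def Claim_equal_determine_categories_covered_py : Prop := ∀ (examples : List (String × String)), Dom_determine_categories_covered_py examples → Spec_determine_categories_covered_py examples (determine_categories_covered_py examples)

-- ===== LEMMAS AND PROOFS =====
theorem if_true_else (c a : Bool) : (if c then true else a) = (a || c) := by
  cases c <;> cases a <;> rfl

theorem pvFlags_fold_eq (xs : List (String × String)) (a u i e r : Bool) :
    xs.foldl pvFlagsStep (a, u, i, e, r) =
      (a || xs.any (fun kv => PySem.Str.isIn "Login" kv.1),
       u || xs.any (fun kv => PySem.Str.isIn "Usuario" kv.1),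
       i || xs.any (fun kv => PySem.Str.isIn "Donacion" kv.1),
       e || xs.any (fun kv => PySem.Str.isIn "Evento" kv.1),
       r || xs.any (fun kv => PySem.Str.isIn "Red" kv.1 || PySem.Str.isIn "Solicitud" kv.1 || PySem.Str.isIn "Oferta" kv.1)) := by
  induction xs generalizing a u i e r with
  | nil => simp
  | cons h t ih =>
    simp only [List.foldl_cons, List.any_cons, pvFlagsStep, if_true_else, ih, Bool.or_assoc]

-- ===== VERDICT (by name: the statement is the Claim_ definition above) =====
theorem determine_categories_covered_py_spec : Claim_equal_determine_categories_covered_py := by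
  intro examples _
  unfold Spec_determine_categories_covered_py determine_categories_covered_py determine_categories_covered_py_alt
  simp only [pvFlags_fold_eq, Bool.false_or, List.any_map]
  rfl
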